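-- pv_equiv track=rewrite | github.com/katomonium/regex-to-code | testes/Codigo/saida.py | preProcessamento
-- ===== SOURCE A (Python) =====
-- def preProcessamento(linhas):
--     dic = {
--         "=" : "=",
--         ">" : ">",
--         "+" : "+",
--         "&" : "&",
--         "<" : "<",
--         "!" : "!",
--         "-" : "-",
--         "*" : "*",
--         "," : ",",
--         "." : ".",
--         "[" : "[",
--         "{" : "{",
--         "(" : "(",
--         ")" : ")",
--         "}" : "}",
--         "]" : "]",
--         ";" : ";"
--
--     }
--     for i in range(len(linhas)):
--         nova = []
--         j = 0
--         while(j < len(linhas[i])):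
--             if(linhas[i][j] in dic):
--                 if(j < (len(linhas[i]) - 1) and linhas[i][j + 1] in dic):
--                     nova.append(" ")
--                     nova.append(linhas[i][j])
--                     nova.append(linhas[i][j + 1])
--                     nova.append(" ")
--                     j += 1
--                 else:
--                     nova.append(" ")
--                     nova.append(linhas[i][j])
--                     nova.append(" ")
--             else:
--                 nova.append(linhas[i][j])
--             j += 1
--         linhas[i] = ''.join(nova)
--     return linhas
-- ===== SOURCE B (Python) =====
-- _PUNCT = set("=>+&<!-*,.[{()}];")
--
-- def _fix(s):
--     out = []
--     i = 0
--     n = len(s)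
--     while i < n:
--         if s[i] in _PUNCT:
--             j = i
--             while j < n and s[j] in _PUNCT:
--                 j += 1
--             run = s[i:j]
--             for k in range(0, len(run), 2):
--                 out.append(' ' + run[k:k+2] + ' ')
--             i = j
--         else:
--             out.append(s[i])
--             i += 1
--     return ''.join(out)
--
-- def preProcessamento(linhas):
--     return [_fix(s) for s in linhas]
-- ===== Notes on version B (the rewrite author's own statement) =====
-- stated objective: alternative
-- what changed: A scans each line char-by-char with a one-char lookahead deciding pair vs single spacing; B extracts each maximal punctuation run in one sweep and emits it in chunks of two wrapped in spaces, returning a new list via comprehension instead of mutating in place.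
import Mathlib
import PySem

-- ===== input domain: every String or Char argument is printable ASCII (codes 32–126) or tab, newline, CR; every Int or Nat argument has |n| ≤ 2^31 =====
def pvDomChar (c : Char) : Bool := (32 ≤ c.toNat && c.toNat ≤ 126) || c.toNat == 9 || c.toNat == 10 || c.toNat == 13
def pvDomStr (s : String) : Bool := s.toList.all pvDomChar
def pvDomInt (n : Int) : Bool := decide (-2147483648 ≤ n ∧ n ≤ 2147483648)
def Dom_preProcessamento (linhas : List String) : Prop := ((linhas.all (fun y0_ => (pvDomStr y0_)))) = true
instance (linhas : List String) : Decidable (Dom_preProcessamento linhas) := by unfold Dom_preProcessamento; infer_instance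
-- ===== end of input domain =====

-- B re-groups maximal punctuation runs and chunks them by two instead of A's char-by-char lookahead scan;
-- equivalence is about the RETURN value only: Python A mutates `linhas` in place, B builds a new list.

-- ===== PORT A =====
-- the 17 punctuation characters of A's dict (keys, in order)
def pvPunct : List Char := ['=', '>', '+', '&', '<', '!', '-', '*', ',', '.', '[', '{', '(', ')', '}', ']', ';']

-- A's inner while loop over j: structural recursion on the remaining characters, same one-char lookahead
def pvLoopA : List Char → List Char
  | [] => []
  | c :: rest =>
    if c ∈ pvPunct then
      match rest with
      | d :: rest' =>
        if d ∈ pvPunct then ' ' :: c :: d :: ' ' :: pvLoopA rest'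
        else ' ' :: c :: ' ' :: pvLoopA (d :: rest')
      | [] => ' ' :: c :: ' ' :: pvLoopA []
    else c :: pvLoopA rest

def preProcessamento (linhas : List String) : List String :=
  linhas.map (fun s => String.mk (pvLoopA s.toList))

-- ===== PORT B =====
-- B's inner run scan: split off the maximal punctuation prefix
def pvTakeRun : List Char → List Char × List Char
  | [] => ([], [])
  | c :: rest =>
    if c ∈ pvPunct then
      let p := pvTakeRun rest
      (c :: p.1, p.2)
    else ([], c :: rest)

theorem pvTakeRun_snd_length (l : List Char) : (pvTakeRun l).2.length ≤ l.length := by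
  induction l with
  | nil => simp [pvTakeRun]
  | cons c rest ih =>
    simp only [pvTakeRun]
    split
    · exact Nat.le_trans ih (Nat.le_succ _)
    · exact Nat.le_refl _

-- B's chunking of a run into pieces of two, each wrapped in spaces
def pvChunkRun : List Char → List Char
  | [] => []
  | [c] => [' ', c, ' ']
  | c :: d :: rest => ' ' :: c :: d :: ' ' :: pvChunkRun rest

-- B's outer scan over a line
def pvLoopB : List Char → List Char
  | [] => []
  | c :: rest =>
    if c ∈ pvPunct then
      let p := pvTakeRun rest
      pvChunkRun (c :: p.1) ++ pvLoopB p.2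
    else c :: pvLoopB rest
termination_by l => l.length
decreasing_by
  · exact Nat.lt_succ_of_le (pvTakeRun_snd_length rest)
  · simp

def preProcessamento_alt (linhas : List String) : List String :=
  linhas.map (fun s => String.mk (pvLoopB s.toList))

-- ===== PRECONDITION & SPEC =====
def Spec_preProcessamento (linhas : List String) (out : List String) : Prop := out = preProcessamento_alt linhas
instance (linhas : List String) (out : List String) : Decidable (Spec_preProcessamento linhas out) := by unfold Spec_preProcessamento; infer_instance

-- ===== CLAIM (what is proved, stated in full; the proofs are below) =====
def Claim_equal_preProcessamento : Prop := ∀ (linhas : List String), Dom_preProcessamento linhas → Spec_preProcessamento linhas (preProcessamento linhas)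

-- ===== LEMMAS AND PROOFS =====

-- folding B's run decomposition back into pvLoopB (pure case analysis, no induction)
theorem pvLoopB_runFold (l : List Char) :
    pvChunkRun (pvTakeRun l).1 ++ pvLoopB (pvTakeRun l).2 = pvLoopB l := by
  cases l with
  | nil => simp [pvTakeRun, pvChunkRun, pvLoopB]
  | cons c rest =>
    by_cases h : c ∈ pvPunct
    · simp [pvTakeRun, pvLoopB, h]
    · simp [pvTakeRun, pvLoopB, h, pvChunkRun]

theorem pvLoopA_eq_pvLoopB (l : List Char) : pvLoopA l = pvLoopB l := by
  induction hn : l.length using Nat.strong_induction_on generalizing l with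
  | _ n ih =>
    cases l with
    | nil => simp [pvLoopA, pvLoopB]
    | cons c rest =>
      by_cases hc : c ∈ pvPunct
      · cases rest with
        | nil => simp [pvLoopA, pvLoopB, pvTakeRun, pvChunkRun, hc]
        | cons d rest' =>
          by_cases hd : d ∈ pvPunct
          · have ih' : pvLoopA rest' = pvLoopB rest' :=
              ih rest'.length (by simp at hn; omega) rest' rfl
            simp only [pvLoopA, pvLoopB, pvTakeRun, hc, hd, if_true, pvChunkRun, ih',
              List.cons_append]
            rw [pvLoopB_runFold]
          · have ih' : pvLoopA (d :: rest') = pvLoopB (d :: rest') :=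
              ih (d :: rest').length (by simp at hn ⊢; omega) _ rfl
            simp [pvLoopA, pvLoopB, pvTakeRun, hc, hd, pvChunkRun, ih']
      · cases rest with
        | nil => simp [pvLoopA, pvLoopB, hc]
        | cons d rest' =>
          have ih' : pvLoopA (d :: rest') = pvLoopB (d :: rest') :=
            ih (d :: rest').length (by simp at hn ⊢; omega) _ rfl
          rw [show pvLoopA (c :: d :: rest') = c :: pvLoopA (d :: rest') from by
                simp [pvLoopA, hc],
              ih']
          simp [pvLoopB, hc]

-- ===== VERDICT (by name: the statement is the Claim_ definition above) =====
theorem preProcessamento_spec : Claim_equal_preProcessamento := by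
  intro linhas _
  unfold Spec_preProcessamento preProcessamento preProcessamento_alt
  simp [pvLoopA_eq_pvLoopB]
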